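-- pv_equiv track=rewrite | github.com/global-nlp/knlp | knlp/seq_labeling/model_train/load_data.py | _split_data
-- ===== SOURCE A (Python) =====
-- def _split_data(datas: list):
--     """
--     将加载的数据分句
--     :return: seqs:list 句列表, tags:list 标签列表
--     """
--     # 空数据
--     if not datas:
--         return [], []
--     # 最后一条数据与其他数据保持一致
--     if len(datas) > 0 and datas[-1] != '\n':
--         datas.append('\n')
--     seqs = []
--     tags = []
--     seq = []
--     tag = []
--     for line in datas:
--         # 去除\n
--         line = line.strip()
--         # 句中
--         if line:
--             line = line.split('\t')
--             seq.append(line[0])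
--             tag.append(line[1])
--         # 句末且句子不为空:存储
--         elif seq:
--             seqs.append(seq)
--             tags.append(tag)
--             seq = []
--             tag = []
--     return seqs, tags
-- ===== SOURCE B (Python) =====
-- def _split_data(datas: list):
--     """Run-scanning re-implementation: find each maximal block of non-blank
--     lines with an index scan, then build that sentence's seq/tag in one go."""
--     if not datas:
--         return [], []
--     if len(datas) > 0 and datas[-1] != '\n':
--         datas.append('\n')
--     seqs, tags = [], []
--     i, n = 0, len(datas)
--     while i < n:
--         if not datas[i].strip():
--             i += 1
--             continue
--         j = i
--         while j < n and datas[j].strip():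
--             j += 1
--         pairs = [datas[k].strip().split('\t') for k in range(i, j)]
--         seqs.append([p[0] for p in pairs])
--         tags.append([p[1] for p in pairs])
--         i = j
--     return seqs, tags
-- ===== Notes on version B (the rewrite author's own statement) =====
-- stated objective: alternative
-- what changed: Replaces A's stateful line-by-line loop with four running accumulators by an index scan that locates each maximal run of non-blank lines (two-pointer run detection) and builds that sentence's seq/tag lists in one comprehension per run.
import Mathlib
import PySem

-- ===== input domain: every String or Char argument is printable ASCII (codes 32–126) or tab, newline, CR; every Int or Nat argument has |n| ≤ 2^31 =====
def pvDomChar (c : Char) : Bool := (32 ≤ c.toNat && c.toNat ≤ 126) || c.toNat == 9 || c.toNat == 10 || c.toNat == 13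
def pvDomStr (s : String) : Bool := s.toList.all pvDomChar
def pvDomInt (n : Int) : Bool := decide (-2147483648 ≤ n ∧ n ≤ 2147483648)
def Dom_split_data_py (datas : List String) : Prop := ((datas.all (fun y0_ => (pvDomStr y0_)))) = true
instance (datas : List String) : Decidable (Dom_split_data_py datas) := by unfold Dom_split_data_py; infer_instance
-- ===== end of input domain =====

-- B replaces A's stateful line-by-line accumulator loop by an index scan that finds each
-- maximal run of non-blank lines and builds that sentence's seq/tag in one go (objective:
-- alternative decomposition). Both A and B append '\n' to `datas` in place when its last
-- element is not '\n'; the equivalence proved here is about the RETURN value.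

-- ===== PORT A =====
-- the for-loop of A, state (seqs, tags, seq, tag); line[1] is pyGetD with default "",
-- exact because Pre_ excludes the IndexError inputs (non-blank lines without a tab)
def pvLoopA : List String → List (List String) → List (List String) → List String → List String → List (List String) × List (List String)
  | [], seqs, tags, _, _ => (seqs, tags)
  | l :: ls, seqs, tags, seq, tag =>
    let line := PySem.Str.strip l
    if line ≠ "" then
      let parts := (PySem.Str.split? line "\t").getD []
      pvLoopA ls seqs tags (seq ++ [PySem.List.pyGetD parts 0 ""]) (tag ++ [PySem.List.pyGetD parts 1 ""])
    else if seq ≠ [] then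
      pvLoopA ls (seqs ++ [seq]) (tags ++ [tag]) [] []
    else
      pvLoopA ls seqs tags seq tag

def split_data_py (datas : List String) : List (List String) × List (List String) :=
  if datas = [] then ([], [])
  else
    let ds := if 0 < datas.length ∧ PySem.List.pyGetD datas (-1) "" ≠ "\n"
              then datas ++ ["\n"] else datas
    pvLoopA ds [] [] [] []

-- ===== PORT B =====
def pvBlank (l : String) : Bool := PySem.Str.strip l == ""

-- the inner comprehension of B: pairs for one run of non-blank lines
def pvPairs (run : List String) : List (List String) :=
  run.map (fun l => (PySem.Str.split? (PySem.Str.strip l) "\t").getD [])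

-- the while-loop of B: skip blank lines; at a non-blank line take the whole run
-- (the inner `while j < n and datas[j].strip()` scan = takeWhile/dropWhile) and
-- emit one sentence; `p[1]` is pyGetD with default "" (IndexError inputs excluded by Pre_)
def pvScanB (lines : List String) : List (List String) × List (List String) :=
  match lines with
  | [] => ([], [])
  | l :: ls =>
    if pvBlank l then pvScanB ls
    else
      let run := ls.takeWhile (fun x => !pvBlank x)
      let rest := ls.dropWhile (fun x => !pvBlank x)
      let pairs := pvPairs (l :: run)
      let r := pvScanB rest
      (pairs.map (fun p => PySem.List.pyGetD p 0 "") :: r.1,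
       pairs.map (fun p => PySem.List.pyGetD p 1 "") :: r.2)
termination_by lines.length
decreasing_by
  all_goals have := (List.dropWhile_sublist (l := ls) (p := fun x => !pvBlank x)).length_le
  all_goals simp_all

def split_data_py_alt (datas : List String) : List (List String) × List (List String) :=
  if datas = [] then ([], [])
  else
    let ds := if 0 < datas.length ∧ PySem.List.pyGetD datas (-1) "" ≠ "\n"
              then datas ++ ["\n"] else datas
    pvScanB ds

-- ===== PRECONDITION & SPEC =====
-- Pre_ excludes exactly the inputs on which Python A raises IndexError: a line whose
-- strip() is non-empty but contains no tab (split('\t') then has no element [1]).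
def Pre_split_data_py (datas : List String) : Prop :=
  ∀ l ∈ datas, PySem.Str.strip l ≠ "" → PySem.Str.isIn "\t" (PySem.Str.strip l) = true
instance (datas : List String) : Decidable (Pre_split_data_py datas) := by
  unfold Pre_split_data_py; infer_instance

def pvWitness_split_data_py : List String := ["he\tA", "is\tB", "\n", "ok\tC\n"]

def Spec_split_data_py (datas : List String) (out : List (List String) × List (List String)) : Prop := out = split_data_py_alt datas
instance (datas : List String) (out : List (List String) × List (List String)) : Decidable (Spec_split_data_py datas out) := by unfold Spec_split_data_py; infer_instance

-- ===== CLAIM (what is proved, stated in full; the proofs are below) =====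
def Claim_equal_split_data_py : Prop := ∀ (datas : List String), Dom_split_data_py datas → Pre_split_data_py datas → Spec_split_data_py datas (split_data_py datas)

-- ===== LEMMAS AND PROOFS =====

-- B's value for a suffix `lines`, merged with A's pending (seq, tag) accumulator:
-- an empty pending changes nothing; a non-empty pending is flushed before a blank
-- head line, and is prepended into the first run's sentence otherwise.
def pvMerge (seq tag : List String) (lines : List String) : List (List String) × List (List String) :=
  if seq = [] then pvScanB lines
  else match lines with
    | [] => ([], [])
    | l :: _ =>
      if pvBlank l then (seq :: (pvScanB lines).1, tag :: (pvScanB lines).2)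
      else match pvScanB lines with
        | (s1 :: ss, t1 :: ts) => ((seq ++ s1) :: ss, (tag ++ t1) :: ts)
        | r => r

lemma pvScanB_blank_cons (l : String) (ls : List String) (h : pvBlank l = true) :
    pvScanB (l :: ls) = pvScanB ls := by
  rw [pvScanB]; simp [h]

lemma pvScanB_cons_shape (l : String) (ls : List String) (h : pvBlank l = false) :
    pvScanB (l :: ls) =
      ((pvPairs (l :: ls.takeWhile (fun x => !pvBlank x))).map (fun p => PySem.List.pyGetD p 0 "") :: (pvScanB (ls.dropWhile (fun x => !pvBlank x))).1,
       (pvPairs (l :: ls.takeWhile (fun x => !pvBlank x))).map (fun p => PySem.List.pyGetD p 1 "") :: (pvScanB (ls.dropWhile (fun x => !pvBlank x))).2) := by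
  rw [pvScanB]; simp [h]

lemma pvMerge_push (l l' : String) (ls' seq tag : List String)
    (hb : pvBlank l = false) (hsync : seq = [] ↔ tag = []) :
    pvMerge (seq ++ [PySem.List.pyGetD ((PySem.Str.split? (PySem.Str.strip l) "\t").getD []) 0 ""])
            (tag ++ [PySem.List.pyGetD ((PySem.Str.split? (PySem.Str.strip l) "\t").getD []) 1 ""])
            (l' :: ls') = pvMerge seq tag (l :: l' :: ls') := by
  by_cases hseq : seq = []
  · have htag := hsync.mp hseq; subst hseq htag
    by_cases hb' : pvBlank l' = true
    · simp [pvMerge, hb', pvScanB_cons_shape l _ hb, pvScanB_blank_cons l' ls' hb', pvPairs]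
    · simp only [Bool.not_eq_true] at hb'
      simp [pvMerge, hb', pvScanB_cons_shape l _ hb, pvScanB_cons_shape l' ls' hb', pvPairs]
  · have htag : ¬ tag = [] := fun h => hseq (hsync.mpr h)
    by_cases hb' : pvBlank l' = true
    · simp [pvMerge, hb, hb', hseq, pvScanB_cons_shape l _ hb, pvScanB_blank_cons l' ls' hb', pvPairs]
    · simp only [Bool.not_eq_true] at hb'
      simp [pvMerge, hb, hb', hseq, pvScanB_cons_shape l _ hb, pvScanB_cons_shape l' ls' hb',
            pvPairs, List.append_assoc]

lemma pvLoopA_eq (lines : List String) : ∀ seqs tags seq tag,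
    (seq = [] ↔ tag = []) →
    (lines = [] → seq = []) →
    (∀ h : lines ≠ [], pvBlank (lines.getLast h) = true) →
    pvLoopA lines seqs tags seq tag =
      (seqs ++ (pvMerge seq tag lines).1, tags ++ (pvMerge seq tag lines).2) := by
  induction lines with
  | nil =>
    intro seqs tags seq tag hsync hnil _
    have h1 : seq = [] := hnil rfl
    have h2 : tag = [] := hsync.mp h1
    subst h1 h2
    simp [pvLoopA, pvMerge, pvScanB]
  | cons l ls ih =>
    intro seqs tags seq tag hsync hnil hlast
    have hlastls : ∀ h : ls ≠ [], pvBlank (ls.getLast h) = true := by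
      intro h
      have := hlast (by simp)
      rwa [List.getLast_cons h] at this
    by_cases hb : pvBlank l = true
    · have hstrip : PySem.Str.strip l = "" := by
        simpa [pvBlank] using hb
      by_cases hseq : seq = []
      · have htag : tag = [] := hsync.mp hseq
        subst hseq htag
        rw [pvLoopA]
        simp only [hstrip, ne_eq, not_true_eq_false, if_false]
        rw [ih seqs tags [] [] ⟨id, id⟩ (fun _ => rfl) hlastls]
        simp [pvMerge, pvScanB_blank_cons l ls hb]
      · have htag : tag ≠ [] := fun h => hseq (hsync.mpr h)
        rw [pvLoopA]
        simp only [hstrip, ne_eq, not_true_eq_false, if_false, hseq, not_false_eq_true, if_pos]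
        rw [ih (seqs ++ [seq]) (tags ++ [tag]) [] [] ⟨id, id⟩ (fun _ => rfl) hlastls]
        simp [pvMerge, hseq, hb, pvScanB_blank_cons l ls hb]
    · have hstrip : ¬ PySem.Str.strip l = "" := by
        simpa [pvBlank] using hb
      rw [pvLoopA]
      simp only [hstrip, ne_eq, not_false_eq_true, if_pos]
      obtain ⟨l', ls', rfl⟩ : ∃ l' ls', ls = l' :: ls' := by
        cases ls with
        | nil =>
          exfalso
          have := hlast (by simp)
          simp [List.getLast] at this
          exact absurd this (by simp [hb])
        | cons a b => exact ⟨a, b, rfl⟩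
      rw [ih seqs tags _ _ (by simp) (by simp) hlastls,
          pvMerge_push l l' ls' seq tag (by simpa using hb) hsync]

-- ===== VERDICT (by name: the statement is the Claim_ definition above) =====
theorem split_data_py_spec : Claim_equal_split_data_py := by
  intro datas _ _
  unfold Spec_split_data_py split_data_py split_data_py_alt
  by_cases h : datas = []
  · simp [h]
  · rw [if_neg h, if_neg h]
    have hl? : (if 0 < datas.length ∧ PySem.List.pyGetD datas (-1) "" ≠ "\n"
                then datas ++ ["\n"] else datas).getLast? = some "\n" := by
      split_ifs with hc
      · exact List.getLast?_concat
      · rw [not_and_or, not_not] at hc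
        have hv : PySem.List.pyGetD datas (-1) "" = "\n" := by
          rcases hc with hc | hc
          · exact absurd (List.length_pos_iff.mpr h) hc
          · exact hc
        rw [PySem.List.pyGetD_neg_one datas "" h] at hv
        rw [List.getLast?_eq_some_getLast h, hv]
    set ds := (if 0 < datas.length ∧ PySem.List.pyGetD datas (-1) "" ≠ "\n"
               then datas ++ ["\n"] else datas) with hds
    have hlast : ∀ hne : ds ≠ [], pvBlank (ds.getLast hne) = true := by
      intro hne
      have h2 : ds.getLast? = some (ds.getLast hne) := List.getLast?_eq_some_getLast hne
      rw [hl?] at h2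
      have h3 : ds.getLast hne = "\n" := by injection h2 with h2; exact h2.symm
      rw [h3]; decide
    show pvLoopA ds [] [] [] [] = pvScanB ds
    rw [pvLoopA_eq ds [] [] [] [] ⟨id, id⟩ (fun _ => rfl) hlast]
    simp [pvMerge]
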